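-- pv_equiv track=rewrite | github.com/haruki7049/deno-overlay | fetch-releases.py | gen_releases_list
-- ===== SOURCE A (Python) =====
-- def gen_releases_list(versions: list, x86_64_linux_urls: list, aarch64_linux_urls: list) -> list:
--     result: list = []
--
--     for version in versions:
--         for url in x86_64_linux_urls:
--             #sha256 = gen_nix_hash(url)
--             sha256 = "hoge"
--
--             if version in url:
--                 result.append({"version": version, "url": url, "arch": "x86_64-linux", "sha256": sha256})
--
--         for url in aarch64_linux_urls:
--             #sha256 = gen_nix_hash(url)
--             sha256 = "hoge"
--
--             if version in url:
--                 result.append({"version": version, "url": url, "arch": "aarch64-linux", "sha256": sha256})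
--
--     return result
-- ===== SOURCE B (Python) =====
-- def gen_releases_list(versions: list, x86_64_linux_urls: list, aarch64_linux_urls: list) -> list:
--     # URL-major scan: tag each URL with its arch once, then stream the tagged URLs,
--     # appending each match to its version's bucket; finally flatten buckets in version order.
--     tagged = [(url, "x86_64-linux") for url in x86_64_linux_urls] + \
--              [(url, "aarch64-linux") for url in aarch64_linux_urls]
--     buckets = [[] for _ in versions]
--     pairs = list(zip(buckets, versions))
--     for url, arch in tagged:
--         for b, v in pairs:
--             if v in url:
--                 b.append({"version": v, "url": url, "arch": arch, "sha256": "hoge"})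
--     out = []
--     for b in buckets:
--         out += b
--     return out
-- ===== Notes on version B (the rewrite author's own statement) =====
-- stated objective: alternative
-- what changed: Replaces A's version-major nested loops (append matches per version, per arch) by a URL-major scan: tag each URL with its arch once, stream the tagged URLs while growing one bucket per version, then flatten the buckets in version order.
import Mathlib
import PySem

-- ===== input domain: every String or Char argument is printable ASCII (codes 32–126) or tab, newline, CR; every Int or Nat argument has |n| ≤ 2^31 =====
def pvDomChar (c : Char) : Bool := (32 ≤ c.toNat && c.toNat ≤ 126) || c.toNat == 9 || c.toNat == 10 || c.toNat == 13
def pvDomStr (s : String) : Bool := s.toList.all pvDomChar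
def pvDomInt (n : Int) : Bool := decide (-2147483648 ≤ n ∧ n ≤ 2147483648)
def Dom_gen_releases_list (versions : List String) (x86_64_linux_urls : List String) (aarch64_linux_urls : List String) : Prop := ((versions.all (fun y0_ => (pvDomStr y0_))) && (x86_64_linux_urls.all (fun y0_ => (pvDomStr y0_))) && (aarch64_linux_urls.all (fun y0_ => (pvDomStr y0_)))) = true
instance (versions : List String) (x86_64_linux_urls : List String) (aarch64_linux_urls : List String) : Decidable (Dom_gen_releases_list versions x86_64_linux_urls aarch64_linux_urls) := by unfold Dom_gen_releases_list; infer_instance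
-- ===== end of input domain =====

-- B replaces A's version-major nested loops by a URL-major scan that grows one bucket
-- per version and flattens the buckets; same output, alternative algorithm (same cost).

-- ===== PORT A =====
def gen_releases_list (versions : List String) (x86_64_linux_urls : List String) (aarch64_linux_urls : List String) : List (List (String × String)) :=
  versions.foldl (fun result version =>
    let result := x86_64_linux_urls.foldl (fun result url =>
      let sha256 := "hoge"
      if PySem.Str.isIn version url then
        result ++ [[("version", version), ("url", url), ("arch", "x86_64-linux"), ("sha256", sha256)]]
      else result) result
    aarch64_linux_urls.foldl (fun result url =>
      let sha256 := "hoge"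
      if PySem.Str.isIn version url then
        result ++ [[("version", version), ("url", url), ("arch", "aarch64-linux"), ("sha256", sha256)]]
      else result) result) []

-- ===== PORT B =====
-- Source B mutates the bucket lists in place through the pre-zipped (bucket, version) pairs;
-- ported functionally: each fold step re-zips buckets with versions and rebuilds them.
def gen_releases_list_alt (versions : List String) (x86_64_linux_urls : List String) (aarch64_linux_urls : List String) : List (List (String × String)) :=
  let tagged := x86_64_linux_urls.map (fun url => (url, "x86_64-linux"))
             ++ aarch64_linux_urls.map (fun url => (url, "aarch64-linux"))
  let buckets : List (List (List (String × String))) := versions.map (fun _ => [])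
  let buckets := tagged.foldl (fun buckets p =>
    (buckets.zip versions).map (fun bv =>
      if PySem.Str.isIn bv.2 p.1 then
        bv.1 ++ [[("version", bv.2), ("url", p.1), ("arch", p.2), ("sha256", "hoge")]]
      else bv.1)) buckets
  buckets.foldl (fun out b => out ++ b) []

-- ===== PRECONDITION & SPEC =====
def Spec_gen_releases_list (versions : List String) (x86_64_linux_urls : List String) (aarch64_linux_urls : List String) (out : List (List (String × String))) : Prop := out = gen_releases_list_alt versions x86_64_linux_urls aarch64_linux_urls
instance (versions : List String) (x86_64_linux_urls : List String) (aarch64_linux_urls : List String) (out : List (List (String × String))) : Decidable (Spec_gen_releases_list versions x86_64_linux_urls aarch64_linux_urls out) := by unfold Spec_gen_releases_list; infer_instance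

-- ===== CLAIM (what is proved, stated in full; the proofs are below) =====
def Claim_equal_gen_releases_list : Prop := ∀ (versions : List String) (x86_64_linux_urls : List String) (aarch64_linux_urls : List String), Dom_gen_releases_list versions x86_64_linux_urls aarch64_linux_urls → Spec_gen_releases_list versions x86_64_linux_urls aarch64_linux_urls (gen_releases_list versions x86_64_linux_urls aarch64_linux_urls)

-- ===== LEMMAS AND PROOFS =====

-- the release dict for one (version, url, arch)
def pvEnt (v u a : String) : List (String × String) :=
  [("version", v), ("url", u), ("arch", a), ("sha256", "hoge")]

-- matching entries of one tagged url against one version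
def pvRow (p : String × String) (v : String) : List (List (String × String)) :=
  if PySem.Str.isIn v p.1 then [pvEnt v p.1 p.2] else []

theorem pv_zipWith_zipWith {α β γ δ : Type} (g : γ → β → δ) (h : α → β → γ) :
    ∀ (bs : List α) (vs : List β),
      List.zipWith g (List.zipWith h bs vs) vs = List.zipWith (fun b v => g (h b v) v) bs vs := by
  intro bs
  induction bs with
  | nil => intro vs; simp
  | cons b bs ih => intro vs; cases vs <;> simp [ih]

theorem pv_zipWith_fst {α β : Type} :
    ∀ (bs : List α) (vs : List β), bs.length ≤ vs.length →
      List.zipWith (fun b (_ : β) => b) bs vs = bs := by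
  intro bs
  induction bs with
  | nil => intro vs _; simp
  | cons b bs ih =>
      intro vs hl
      cases vs with
      | nil => simp at hl
      | cons v vs =>
          simp only [List.zipWith_cons_cons, List.cons.injEq, true_and]
          exact ih vs (by simpa using hl)

-- the bucket loop invariant: after folding the tagged urls, bucket i holds
-- exactly version i's matches, in tagged order
theorem pv_buckets_inv :
    ∀ (ts : List (String × String)) (vs : List String)
      (bs : List (List (List (String × String)))), bs.length ≤ vs.length →
      ts.foldl (fun bs t => List.zipWith (fun b v => b ++ pvRow t v) bs vs) bs
        = List.zipWith (fun b v => b ++ ts.flatMap (fun t => pvRow t v)) bs vs := by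
  intro ts
  induction ts with
  | nil =>
      intro vs bs hl
      simp only [List.foldl_nil, List.flatMap_nil, List.append_nil]
      exact (pv_zipWith_fst bs vs hl).symm
  | cons t ts ih =>
      intro vs bs hl
      simp only [List.foldl_cons]
      rw [ih vs _ (by simp [List.length_zipWith]), pv_zipWith_zipWith]
      simp [List.append_assoc]

theorem pv_flatMap_if_singleton {α β : Type} (p : α → Bool) (f : α → β) :
    ∀ (l : List α), (l.flatMap (fun x => if p x then [f x] else [])) = (l.filter p).map f := by
  intro l
  induction l with
  | nil => simp
  | cons x l ih => by_cases h : p x <;> simp [h, ih]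

-- A's nested loops, characterised: version-major flatMap of the per-arch filters
theorem pv_A_eq (x86 aarch : List String) :
    ∀ (vs : List String) (acc : List (List (String × String))),
      vs.foldl (fun result version =>
        aarch.foldl (fun result url =>
            if PySem.Str.isIn version url then result ++ [pvEnt version url "aarch64-linux"] else result)
          (x86.foldl (fun result url =>
            if PySem.Str.isIn version url then result ++ [pvEnt version url "x86_64-linux"] else result) result)) acc
      = acc ++ vs.flatMap (fun v =>
          (x86.filter (fun u => PySem.Str.isIn v u)).map (fun u => pvEnt v u "x86_64-linux")
          ++ (aarch.filter (fun u => PySem.Str.isIn v u)).map (fun u => pvEnt v u "aarch64-linux")) := by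
  intro vs
  induction vs with
  | nil => intro acc; simp
  | cons v vs ih =>
      intro acc
      simp only [List.foldl_cons, List.flatMap_cons]
      rw [PySem.List.foldl_append_if (p := fun u => PySem.Str.isIn v u)
            (f := fun u => pvEnt v u "x86_64-linux"),
          PySem.List.foldl_append_if (p := fun u => PySem.Str.isIn v u)
            (f := fun u => pvEnt v u "aarch64-linux"),
          ih]
      simp [List.append_assoc]

theorem pv_zipWith_self {α γ : Type} (f : α → α → γ) :
    ∀ (l : List α), List.zipWith f l l = l.map (fun x => f x x) := by
  intro l
  induction l with
  | nil => simp
  | cons x l ih => rw [List.zipWith_cons_cons, List.map_cons, ih]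

-- B's bucket loop + flatten, characterised over an arbitrary tagged list
theorem pv_B_eq (versions : List String) (tagged : List (String × String)) :
    (tagged.foldl (fun buckets p =>
        (buckets.zip versions).map (fun bv =>
          if PySem.Str.isIn bv.2 p.1 then bv.1 ++ [pvEnt bv.2 p.1 p.2] else bv.1))
      (versions.map (fun _ => []))).foldl (fun out b => out ++ b) []
    = versions.flatMap (fun v => tagged.flatMap (fun t => pvRow t v)) := by
  have hstep : (fun (buckets : List (List (List (String × String)))) (p : String × String) =>
      (buckets.zip versions).map (fun bv =>
        if PySem.Str.isIn bv.2 p.1 then bv.1 ++ [pvEnt bv.2 p.1 p.2] else bv.1))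
      = fun buckets p => List.zipWith (fun b v => b ++ pvRow p v) buckets versions := by
    funext bs p
    have hfun : (fun (bv : List (List (String × String)) × String) =>
        if PySem.Str.isIn bv.2 p.1 then bv.1 ++ [pvEnt bv.2 p.1 p.2] else bv.1)
        = fun bv => bv.1 ++ pvRow p bv.2 := by
      funext bv
      simp only [pvRow]
      by_cases h : PySem.Str.isIn bv.2 p.1 = true
      · rw [if_pos h, if_pos h]
      · rw [if_neg h, if_neg h, List.append_nil]
    rw [hfun]
    induction bs generalizing versions with
    | nil => simp
    | cons b bs ih => cases versions <;> simp [ih]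
  rw [hstep, pv_buckets_inv tagged versions _ (by simp),
      PySem.List.foldl_append_eq_flatten, List.zipWith_map_left, pv_zipWith_self]
  simp [List.flatten_eq_flatMap, List.flatMap_map]

-- ===== VERDICT (by name: the statement is the Claim_ definition above) =====
theorem gen_releases_list_spec : Claim_equal_gen_releases_list := by
  intro versions x86 aarch _
  show gen_releases_list versions x86 aarch = gen_releases_list_alt versions x86 aarch
  have hA : gen_releases_list versions x86 aarch
      = [] ++ versions.flatMap (fun v =>
          (x86.filter (fun u => PySem.Str.isIn v u)).map (fun u => pvEnt v u "x86_64-linux")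
          ++ (aarch.filter (fun u => PySem.Str.isIn v u)).map (fun u => pvEnt v u "aarch64-linux")) :=
    pv_A_eq x86 aarch versions []
  have hB : gen_releases_list_alt versions x86 aarch
      = versions.flatMap (fun v =>
          (x86.map (fun url => (url, "x86_64-linux")) ++ aarch.map (fun url => (url, "aarch64-linux"))).flatMap
            (fun t => pvRow t v)) :=
    pv_B_eq versions _
  rw [hA, hB, List.nil_append]
  congr 1
  funext v
  simp [List.flatMap_append, List.flatMap_map, pvRow, pv_flatMap_if_singleton]
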